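-- pv_equiv track=rewrite | github.com/AshleyMoriahLazaraga/Digital-Encoding-Techniques | app.py | pseudoternary_encoding
-- ===== SOURCE A (Python) =====
-- def pseudoternary_encoding(binary_input, initial_high):
--     x_values = []
--     y_values = []
--     time = 0
--     if initial_high:
--         last_level = 1
--     else:
--         last_level = -1
--
--     for bit in binary_input:
--         x_values.extend([time, time + 1])
--         if bit == '0':
--             last_level = -last_level
--             y_values.extend([last_level, last_level])
--         else:
--             y_values.extend([0, 0])
--         time += 1
--     return x_values, y_values
-- ===== SOURCE B (Python) =====
-- def pseudoternary_encoding(binary_input, initial_high):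
--     n = len(binary_input)
--     # x is a closed form of the doubled index pattern 0,1,1,2,2,...,n-1,n
--     x_values = [(j + 1) // 2 for j in range(2 * n)]
--     init = 1 if initial_high else -1
--     # split on the zero bits: each separator is a zero whose level alternates
--     # with the parity of its ordinal; every char inside a segment contributes (0,0)
--     segments = binary_input.split('0')
--     y_values = []
--     for k, seg in enumerate(segments):
--         if k > 0:
--             level = init if k % 2 == 0 else -init
--             y_values += [level, level]
--         y_values += [0, 0] * len(seg)
--     return x_values, y_values
-- ===== Notes on version B (the rewrite author's own statement) =====
-- stated objective: alternative
-- what changed: Replaces A's single stateful loop (time counter + sign-flipping last_level) by a split-based algorithm: x_values come from a closed-form map over range(2n), and y_values are rebuilt from binary_input.split('0'), where each segment contributes [0,0] pairs and each separator (a zero bit) gets its level directly from the parity of its ordinal.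
import Mathlib
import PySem

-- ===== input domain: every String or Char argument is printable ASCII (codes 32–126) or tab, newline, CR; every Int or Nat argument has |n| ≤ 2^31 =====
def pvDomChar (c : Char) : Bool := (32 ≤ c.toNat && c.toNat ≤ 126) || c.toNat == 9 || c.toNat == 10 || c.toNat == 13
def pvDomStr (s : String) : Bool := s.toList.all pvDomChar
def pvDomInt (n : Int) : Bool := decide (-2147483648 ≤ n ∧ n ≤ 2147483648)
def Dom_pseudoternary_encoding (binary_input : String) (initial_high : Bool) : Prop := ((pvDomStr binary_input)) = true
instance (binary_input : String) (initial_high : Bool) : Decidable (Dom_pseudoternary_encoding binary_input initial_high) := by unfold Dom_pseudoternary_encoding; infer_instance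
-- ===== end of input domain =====

-- B replaces A's stateful flip loop by a split-on-'0' decomposition: x is a closed form of the doubled index, y is rebuilt from the segments between zeros, each zero's level read off the parity of its ordinal; same O(n) cost.


-- ===== PORT A =====
-- one fold over the bits carrying (x_values, y_values, time, last_level), as in A
def pseudoternary_encoding (binary_input : String) (initial_high : Bool) : List Int × List Int :=
  let last_level : Int := if initial_high then 1 else -1
  let r := binary_input.toList.foldl
    (fun (st : List Int × List Int × Int × Int) bit =>
      let x_values := st.1 ++ [st.2.2.1, st.2.2.1 + 1]
      if bit = '0' then
        (x_values, st.2.1 ++ [-st.2.2.2, -st.2.2.2], st.2.2.1 + 1, -st.2.2.2)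
      else
        (x_values, st.2.1 ++ [(0 : Int), 0], st.2.2.1 + 1, st.2.2.2))
    ([], [], 0, last_level)
  (r.1, r.2.1)

-- ===== PORT B =====
-- as in Source B: x from a closed form over range(2n); y from binary_input.split('0')
-- (PySem.Chars.splitOn = Python str.split with a nonempty separator), each
-- separator's level chosen by the parity of its ordinal k, segments giving [0,0]*len
def pseudoternary_encoding_alt (binary_input : String) (initial_high : Bool) : List Int × List Int :=
  let n : Int := binary_input.toList.length
  let x_values := (PySem.List.pyRange 0 (2 * n) 1).map (fun j => PySem.Int.floordiv (j + 1) 2)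
  let init : Int := if initial_high then 1 else -1
  let segments := PySem.Chars.splitOn binary_input.toList ['0']
  let y_values := (PySem.List.enumerate segments).foldl
    (fun (acc : List Int) (p : Int × List Char) =>
      let acc1 := if p.1 > 0 then
          acc ++ (let level := if PySem.Int.mod p.1 2 == 0 then init else -init
                  [level, level])
        else acc
      acc1 ++ PySem.List.pyRepeat [(0 : Int), 0] (p.2.length : Int))
    []
  (x_values, y_values)

-- ===== PRECONDITION & SPEC =====
def Spec_pseudoternary_encoding (binary_input : String) (initial_high : Bool) (out : List Int × List Int) : Prop := out = pseudoternary_encoding_alt binary_input initial_high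
instance (binary_input : String) (initial_high : Bool) (out : List Int × List Int) : Decidable (Spec_pseudoternary_encoding binary_input initial_high out) := by unfold Spec_pseudoternary_encoding; infer_instance

-- ===== CLAIM (what is proved, stated in full; the proofs are below) =====
def Claim_equal_pseudoternary_encoding : Prop := ∀ (binary_input : String) (initial_high : Bool), Dom_pseudoternary_encoding binary_input initial_high → Spec_pseudoternary_encoding binary_input initial_high (pseudoternary_encoding binary_input initial_high)

-- ===== LEMMAS AND PROOFS =====

-- reference x sequence starting at time t for n bits
def pvSpecX : Nat → Int → List Int
  | 0, _ => []
  | n + 1, t => t :: (t + 1) :: pvSpecX n (t + 1)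

-- reference y sequence: flip-and-duplicate, A's shape
def pvSpecY : List Char → Int → List Int
  | [], _ => []
  | b :: bs, ll =>
      if b = '0' then (-ll) :: (-ll) :: pvSpecY bs (-ll) else 0 :: 0 :: pvSpecY bs ll

def pvLast : List Char → Int → Int
  | [], ll => ll
  | b :: bs, ll => if b = '0' then pvLast bs (-ll) else pvLast bs ll

lemma foldA_eq (l : List Char) : ∀ (x y : List Int) (t ll : Int),
    l.foldl
      (fun (st : List Int × List Int × Int × Int) bit =>
        let x_values := st.1 ++ [st.2.2.1, st.2.2.1 + 1]
        if bit = '0' then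
          (x_values, st.2.1 ++ [-st.2.2.2, -st.2.2.2], st.2.2.1 + 1, -st.2.2.2)
        else
          (x_values, st.2.1 ++ [(0 : Int), 0], st.2.2.1 + 1, st.2.2.2))
      (x, y, t, ll)
    = (x ++ pvSpecX l.length t, y ++ pvSpecY l ll, t + l.length, pvLast l ll) := by
  induction l with
  | nil => intro x y t ll; simp [pvSpecX, pvSpecY, pvLast]
  | cons b bs ih =>
      intro x y t ll
      by_cases hb : b = '0' <;>
      · simp only [List.foldl_cons, hb, if_true, if_false, ih, pvSpecX, pvSpecY, pvLast,
          List.length_cons, Prod.mk.injEq]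
        refine ⟨by simp, by simp, by push_cast; ring, by trivial⟩

lemma pvSpecX_succ (n : Nat) : ∀ t : Int, pvSpecX (n + 1) t = pvSpecX n t ++ [t + n, t + n + 1] := by
  induction n with
  | zero => intro t; simp [pvSpecX]
  | succ m ih =>
      intro t
      show t :: (t + 1) :: pvSpecX (m + 1) (t + 1) = (t :: (t + 1) :: pvSpecX m (t + 1)) ++ _
      rw [ih (t + 1)]
      have h1 : t + 1 + (m : Int) = t + ((m + 1 : Nat) : Int) := by push_cast; ring
      simp [h1]

-- x side: the closed form over range(2n) is exactly the 0,1,1,2,... sequence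
lemma x_side (n : Nat) :
    (PySem.List.pyRange 0 (2 * (n : Int)) 1).map (fun j => PySem.Int.floordiv (j + 1) 2)
      = pvSpecX n 0 := by
  induction n with
  | zero => simp [PySem.List.pyRange_one_eq_nil, pvSpecX]
  | succ m ih =>
      have h2 : (2 : Int) * ((m + 1 : Nat) : Int) = 2 * m + 2 := by push_cast; ring
      have htail : PySem.List.pyRange (2 * (m : Int)) (2 * m + 2) 1
          = [2 * (m : Int), 2 * m + 1] := by
        rw [PySem.List.pyRange_one_cons (by omega), PySem.List.pyRange_one_cons (by omega),
          PySem.List.pyRange_one_eq_nil (by omega)]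
      rw [h2, PySem.List.pyRange_one_append 0 (2 * m) (2 * m + 2) (by positivity) (by omega),
        htail, List.map_append, ih, pvSpecX_succ]
      have e1 : PySem.Int.floordiv (2 * (m : Int) + 1) 2 = (m : Int) := by
        unfold PySem.Int.floordiv
        rw [Int.fdiv_eq_ediv]; split_ifs with hh
        · omega
        · exact absurd (Or.inl (by norm_num)) hh
      have e2 : PySem.Int.floordiv (2 * (m : Int) + 1 + 1) 2 = (m : Int) + 1 := by
        unfold PySem.Int.floordiv
        rw [Int.fdiv_eq_ediv]; split_ifs with hh
        · omega
        · exact absurd (Or.inl (by norm_num)) hh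
      simp
      exact ⟨by omega, by omega⟩

-- the simple structural split on '0' (Python s.split('0'))
def pvSplit : List Char → List (List Char)
  | [] => [[]]
  | c :: rest =>
      if c = '0' then [] :: pvSplit rest
      else match pvSplit rest with
        | s :: ss => (c :: s) :: ss
        | [] => [[c]]

lemma pvSplit_ne_nil (l : List Char) : pvSplit l ≠ [] := by
  cases l with
  | nil => simp [pvSplit]
  | cons c rest =>
      unfold pvSplit
      split_ifs
      · simp
      · cases h : pvSplit rest <;> simp

lemma splitOn_go_eq (l : List Char) : ∀ (fuel : Nat), l.length ≤ fuel →
    ∀ (cur : List Char) (acc : List (List Char)),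
    PySem.Chars.splitOn.go ['0'] fuel l cur acc
      = acc.reverse ++ (match pvSplit l with
          | s :: ss => (cur.reverse ++ s) :: ss
          | [] => []) := by
  induction l with
  | nil =>
      intro fuel _ cur acc
      cases fuel <;> simp [PySem.Chars.splitOn.go, pvSplit]
  | cons c rest ih =>
      intro fuel hf cur acc
      cases fuel with
      | zero => simp at hf
      | succ f =>
          rw [PySem.Chars.splitOn.go.eq_def]
          simp only [List.isPrefixOf]
          by_cases hc : c = '0'
          · rw [if_pos (by simp [hc])]
            simp only [List.length_cons, List.length_nil, List.drop_succ_cons, List.drop_zero]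
            rw [ih f (by simpa using hf) [] (cur.reverse :: acc)]
            rcases hs : pvSplit rest with _ | ⟨t0, ts⟩
            · exact absurd hs (pvSplit_ne_nil rest)
            · simp [pvSplit, hc, hs]
          · have hfalse : ('0' == c) = false := beq_eq_false_iff_ne.mpr (Ne.symm hc)
            rw [if_neg (by simp [hfalse])]
            rw [ih f (by simpa using hf) (c :: cur) acc]
            rcases hs : pvSplit rest with _ | ⟨t0, ts⟩
            · exact absurd hs (pvSplit_ne_nil rest)
            · simp [pvSplit, hc, hs]

lemma splitOn_eq (l : List Char) : PySem.Chars.splitOn l ['0'] = pvSplit l := by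
  unfold PySem.Chars.splitOn
  rw [splitOn_go_eq l (l.length + 1) (by omega) [] []]
  rcases hs : pvSplit l with _ | ⟨t0, ts⟩
  · exact absurd hs (pvSplit_ne_nil l)
  · simp

-- [0,0] * len(seg)
def pvZeros2 : List Char → List Int
  | [] => []
  | _ :: rest => 0 :: 0 :: pvZeros2 rest

lemma pyRepeat_eq_pvZeros2 (s : List Char) :
    PySem.List.pyRepeat [(0 : Int), 0] (s.length : Int) = pvZeros2 s := by
  unfold PySem.List.pyRepeat
  have h : ((s.length : Nat) : Int).toNat = s.length := by omega
  rw [h]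
  induction s with
  | nil => simp [pvZeros2]
  | cons c rest ih => simp [List.replicate_succ, pvZeros2, ih]

-- the level of the k-th zero (k ≥ 1), as B computes it
def pvLvl (init k : Int) : Int := if PySem.Int.mod k 2 == 0 then init else -init

lemma pvLvl_succ (init k : Int) : pvLvl init (k + 1) = -(pvLvl init k) := by
  unfold pvLvl PySem.Int.mod
  rw [Int.fmod_eq_emod_of_nonneg _ (by norm_num), Int.fmod_eq_emod_of_nonneg _ (by norm_num)]
  rcases Int.emod_two_eq k with h | h
  · have h1 : (k + 1) % 2 = 1 := by omega
    simp [h, h1]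
  · have h1 : (k + 1) % 2 = 0 := by omega
    simp [h, h1]

-- tail of the y sequence after the first segment, one zero per remaining segment
def pvH (init : Int) : Int → List (List Char) → List Int
  | _, [] => []
  | k, s :: ss =>
      pvLvl init (k + 1) :: pvLvl init (k + 1) :: (pvZeros2 s ++ pvH init (k + 1) ss)

lemma pvH_eq_specY (init : Int) (l : List Char) : ∀ (k : Int),
    (match pvSplit l with
      | s0 :: ss => pvZeros2 s0 ++ pvH init k ss
      | [] => []) = pvSpecY l (pvLvl init k) := by
  induction l with
  | nil => intro k; simp [pvSplit, pvZeros2, pvH, pvSpecY]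
  | cons c rest ih =>
      intro k
      by_cases hc : c = '0'
      · rcases hs : pvSplit rest with _ | ⟨t0, ts⟩
        · exact absurd hs (pvSplit_ne_nil rest)
        · have ihk := ih (k + 1)
          rw [hs] at ihk
          have ihk' : pvZeros2 t0 ++ pvH init (k + 1) ts
              = pvSpecY rest (pvLvl init (k + 1)) := ihk
          simp only [pvSplit, hc, if_true, hs, pvH, pvZeros2, List.nil_append, pvSpecY,
            pvLvl_succ, ihk']
      · rcases hs : pvSplit rest with _ | ⟨t0, ts⟩
        · exact absurd hs (pvSplit_ne_nil rest)
        · have ihk := ih k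
          rw [hs] at ihk
          have ihk' : pvZeros2 t0 ++ pvH init k ts = pvSpecY rest (pvLvl init k) := ihk
          simp only [pvSplit, hc, if_false, hs, pvZeros2, pvSpecY, List.cons_append]
          rw [ihk']

-- unfolding B's fold over the enumerated segments (indices k+1, k+2, … all positive)
lemma foldB_eq (init : Int) (ss : List (List Char)) : ∀ (k : Int), 0 ≤ k → ∀ (acc : List Int),
    (PySem.List.enumerate ss (k + 1)).foldl
      (fun (acc : List Int) (p : Int × List Char) =>
        let acc1 := if p.1 > 0 then
            acc ++ (let level := if PySem.Int.mod p.1 2 == 0 then init else -init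
                    [level, level])
          else acc
        acc1 ++ PySem.List.pyRepeat [(0 : Int), 0] (p.2.length : Int))
      acc
    = acc ++ pvH init k ss := by
  induction ss with
  | nil => intro k _ acc; simp [PySem.List.enumerate, pvH]
  | cons s ss ih =>
      intro k hk acc
      have hpos : k + 1 > 0 := by omega
      simp only [PySem.List.enumerate, List.foldl_cons]
      rw [ih (k + 1) (by omega)]
      simp only [hpos, if_true, pyRepeat_eq_pvZeros2, pvH, pvLvl]
      simp [List.append_assoc]

lemma foldB_all (init : Int) (s0 : List Char) (ss : List (List Char)) :
    (PySem.List.enumerate (s0 :: ss)).foldl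
      (fun (acc : List Int) (p : Int × List Char) =>
        let acc1 := if p.1 > 0 then
            acc ++ (let level := if PySem.Int.mod p.1 2 == 0 then init else -init
                    [level, level])
          else acc
        acc1 ++ PySem.List.pyRepeat [(0 : Int), 0] (p.2.length : Int))
      []
    = pvZeros2 s0 ++ pvH init 0 ss := by
  simp only [PySem.List.enumerate, List.foldl_cons]
  rw [foldB_eq init ss 0 (le_refl 0)]
  simp [pyRepeat_eq_pvZeros2]

-- ===== VERDICT (by name: the statement is the Claim_ definition above) =====
theorem pseudoternary_encoding_spec : Claim_equal_pseudoternary_encoding := by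
  intro s h _
  show pseudoternary_encoding s h = pseudoternary_encoding_alt s h
  unfold pseudoternary_encoding pseudoternary_encoding_alt
  rcases hs : pvSplit s.toList with _ | ⟨t0, ts⟩
  · exact absurd hs (pvSplit_ne_nil s.toList)
  · simp only [foldA_eq, List.nil_append, splitOn_eq, hs, foldB_all, x_side]
    have key := pvH_eq_specY (if h then 1 else -1) s.toList 0
    rw [hs] at key
    have key' : pvZeros2 t0 ++ pvH (if h then (1 : Int) else -1) 0 ts
        = pvSpecY s.toList (pvLvl (if h then (1 : Int) else -1) 0) := key
    have hlvl0 : pvLvl (if h then (1 : Int) else -1) 0 = (if h then (1 : Int) else -1) := by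
      simp [pvLvl, PySem.Int.mod, Int.fmod]
    rw [hlvl0] at key'
    rw [key']
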